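-- pv_equiv track=rewrite | github.com/WHB139426/Grounded-VideoLLM | datasets/vtg_it.py | parse_time_string
-- ===== SOURCE A (Python) =====
-- def parse_time_string(time_string):
--     # 定义时间标记到数字的映射
--     time_mapping = {
--         "<TIME_ZERO>": "0",
--         "<TIME_ONE>": "1",
--         "<TIME_TWO>": "2",
--         "<TIME_THREE>": "3",
--         "<TIME_FOUR>": "4",
--         "<TIME_FIVE>": "5",
--         "<TIME_SIX>": "6",
--         "<TIME_SEVEN>": "7",
--         "<TIME_EIGHT>": "8",
--         "<TIME_NINE>": "9",
--         "<TIME_DOT>": "."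
--     }
--
--     # 替换时间标记为实际数字
--     for key, value in time_mapping.items():
--         time_string = time_string.replace(key, value)
--     return time_string
-- ===== SOURCE B (Python) =====
-- def parse_time_string(time_string):
--     words = ["ZERO", "ONE", "TWO", "THREE", "FOUR", "FIVE", "SIX", "SEVEN", "EIGHT", "NINE", "DOT"]
--     table = {"<TIME_%s>" % w: ch for w, ch in zip(words, "0123456789.")}
--     out = []
--     i = 0
--     n = len(time_string)
--     while i < n:
--         if time_string[i] == '<':
--             for key, value in table.items():
--                 if time_string.startswith(key, i):
--                     out.append(value)
--                     i += len(key)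
--                     break
--             else:
--                 out.append(time_string[i])
--                 i += 1
--         else:
--             out.append(time_string[i])
--             i += 1
--     return ''.join(out)
-- ===== Notes on version B (the rewrite author's own statement) =====
-- stated objective: alternative
-- what changed: B makes a single left-to-right scan of the string, emitting at each position either the digit for the first time-token matching there (skipping its length) or the character itself, instead of A's 11 successive full-string replace passes; equivalence rests on the tokens being non-overlapping and replacement characters occurring in no token.
import Mathlib
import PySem

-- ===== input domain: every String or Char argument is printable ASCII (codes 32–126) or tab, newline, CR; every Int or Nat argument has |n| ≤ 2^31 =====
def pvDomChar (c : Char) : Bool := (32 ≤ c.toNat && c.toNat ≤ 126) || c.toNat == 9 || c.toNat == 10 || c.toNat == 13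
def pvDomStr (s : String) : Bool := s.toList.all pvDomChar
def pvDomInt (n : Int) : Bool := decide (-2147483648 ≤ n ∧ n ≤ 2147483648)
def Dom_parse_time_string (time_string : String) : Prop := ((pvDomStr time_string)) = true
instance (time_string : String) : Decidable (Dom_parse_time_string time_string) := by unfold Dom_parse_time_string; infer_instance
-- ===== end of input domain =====

-- B replaces A's 11 successive full-string replace passes by one left-to-right scan
-- emitting first-matching-token replacements (objective: alternative algorithm, same result).

-- ===== PORT A =====
-- the time_mapping dict of A, as an association list in insertion order
def pvMapA : List (String × String) :=
  [("<TIME_ZERO>", "0"),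
   ("<TIME_ONE>", "1"),
   ("<TIME_TWO>", "2"),
   ("<TIME_THREE>", "3"),
   ("<TIME_FOUR>", "4"),
   ("<TIME_FIVE>", "5"),
   ("<TIME_SIX>", "6"),
   ("<TIME_SEVEN>", "7"),
   ("<TIME_EIGHT>", "8"),
   ("<TIME_NINE>", "9"),
   ("<TIME_DOT>", ".")]

-- literal port of A: for key, value in time_mapping.items(): time_string = time_string.replace(key, value)
def parse_time_string (time_string : String) : String :=
  pvMapA.foldl (fun s kv => PySem.Str.replace s kv.1 kv.2) time_string

-- ===== PORT B =====
-- the word list and table comprehension of B, at character-list level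
def pvWords : List (List Char) :=
  [['Z','E','R','O'], ['O','N','E'], ['T','W','O'], ['T','H','R','E','E'], ['F','O','U','R'],
   ['F','I','V','E'], ['S','I','X'], ['S','E','V','E','N'], ['E','I','G','H','T'], ['N','I','N','E'],
   ['D','O','T']]

-- table = { "<TIME_%s>" % w : ch for w, ch in zip(words, "0123456789.") }
def pvMapB : List (List Char × List Char) :=
  (pvWords.zip "0123456789.".toList).map
    (fun wc => ('<' :: 'T' :: 'I' :: 'M' :: 'E' :: '_' :: wc.1 ++ ['>'], [wc.2]))

-- every key of the table is nonempty (cited by scanGo's termination proof)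
theorem pvMapB_key_len : ∀ kv ∈ pvMapB, 0 < kv.1.length := by
  have h : pvMapB.all (fun kv => decide (0 < kv.1.length)) = true := by rfl
  simp only [List.all_eq_true, decide_eq_true_eq] at h
  exact h

-- the while-loop of B: walk the characters once; at a '<' try the table in order,
-- emit the value and skip the key on the first match, else copy the character
def scanGo (l : List Char) : List Char :=
  match l with
  | [] => []
  | c :: t =>
    if c = '<' then
      match h : pvMapB.find? (fun kv => kv.1.isPrefixOf (c :: t)) with
      | some kv => kv.2 ++ scanGo ((c :: t).drop kv.1.length)
      | none => c :: scanGo t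
    else c :: scanGo t
termination_by l.length
decreasing_by
  · have hm := List.mem_of_find?_eq_some h
    have h1 := pvMapB_key_len kv hm
    simp only [List.length_drop, List.length_cons]
    omega
  · simp
  · simp

def parse_time_string_alt (time_string : String) : String :=
  String.ofList (scanGo time_string.toList)

-- ===== PRECONDITION & SPEC =====
def Spec_parse_time_string (time_string : String) (out : String) : Prop := out = parse_time_string_alt time_string
instance (time_string : String) (out : String) : Decidable (Spec_parse_time_string time_string out) := by unfold Spec_parse_time_string; infer_instance

-- ===== CLAIM (what is proved, stated in full; the proofs are below) =====
def Claim_equal_parse_time_string : Prop := ∀ (time_string : String), Dom_parse_time_string time_string → Spec_parse_time_string time_string (parse_time_string time_string)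

-- ===== LEMMAS AND PROOFS =====

-- structural recursion equivalent of PySem.Chars.replace (for nonempty old)
def replaceL (old new : List Char) (l : List Char) : List Char :=
  match l with
  | [] => []
  | c :: t =>
    if h : old ≠ [] ∧ old.isPrefixOf (c :: t) then
      new ++ replaceL old new ((c :: t).drop old.length)
    else c :: replaceL old new t
termination_by l.length
decreasing_by
  · have : 0 < old.length := List.length_pos_of_ne_nil h.1
    simp only [List.length_drop, List.length_cons]
    omega
  · simp

theorem go_eq (old new : List Char) (hold : old ≠ []) :
    ∀ (fuel : Nat) (l acc : List Char), l.length ≤ fuel →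
      PySem.Chars.replace.go old new fuel l acc = acc.reverse ++ replaceL old new l := by
  intro fuel
  induction fuel with
  | zero =>
    intro l acc hl
    have hnil : l = [] := List.eq_nil_of_length_eq_zero (Nat.le_zero.mp hl)
    subst hnil
    simp [PySem.Chars.replace.go, replaceL]
  | succ n ih =>
    intro l acc hl
    cases l with
    | nil => simp [PySem.Chars.replace.go, replaceL]
    | cons c t =>
      rw [PySem.Chars.replace.go]
      by_cases hp : old.isPrefixOf (c :: t)
      · have hlen : 0 < old.length := List.length_pos_of_ne_nil hold
        have hdl : ((c :: t).drop old.length).length ≤ n := by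
          simp only [List.length_drop, List.length_cons]
          simp only [List.length_cons] at hl
          omega
        rw [if_pos hp, ih _ _ hdl, replaceL]
        rw [dif_pos ⟨hold, hp⟩]
        simp
      · rw [if_neg hp, ih t (c :: acc) (by simp only [List.length_cons] at hl; omega)]
        rw [replaceL]
        rw [dif_neg (by intro h; exact hp h.2)]
        simp

theorem replace_eq (l old new : List Char) (hold : old ≠ []) :
    PySem.Chars.replace l old new = replaceL old new l := by
  rw [PySem.Chars.replace]
  rw [if_neg (by simp [hold])]
  rw [go_eq old new hold l.length l [] le_rfl]
  simp

-- L1: no match at the front ⇒ the head character passes through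
theorem replaceL_cons_not_prefix {old : List Char} (new : List Char) {c : Char} {t : List Char}
    (h : ¬ old <+: c :: t) : replaceL old new (c :: t) = c :: replaceL old new t := by
  rw [replaceL]
  rw [dif_neg (by intro hg; exact h (List.isPrefixOf_iff_prefix.mp hg.2))]

-- L2: a match at the front is consumed
theorem replaceL_append_self (old new t : List Char) (hold : old ≠ []) :
    replaceL old new (old ++ t) = new ++ replaceL old new t := by
  cases old with
  | nil => exact absurd rfl hold
  | cons a old' =>
    have hshape : (a :: old') ++ t = a :: (old' ++ t) := by simp
    rw [hshape, replaceL]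
    rw [dif_pos ⟨hold, by rw [← hshape]; exact List.isPrefixOf_iff_prefix.mpr (List.prefix_append _ _)⟩]
    congr 1
    rw [← hshape]
    congr 1
    exact List.drop_left

-- NM: a pattern w sharing no character with new cannot newly appear as a prefix
theorem replaceL_no_new_prefix (old new : List Char) (hnew : new ≠ []) :
    ∀ (n : Nat) (w l : List Char), (∀ a ∈ new, a ∉ w) → l.length ≤ n →
      w <+: replaceL old new l → w <+: l := by
  intro n
  induction n with
  | zero =>
    intro w l _ hl hpre
    have hnil : l = [] := List.eq_nil_of_length_eq_zero (Nat.le_zero.mp hl)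
    subst hnil
    simpa [replaceL] using hpre
  | succ n ih =>
    intro w l hdis hl hpre
    cases l with
    | nil => simpa [replaceL] using hpre
    | cons c t =>
      rw [replaceL] at hpre
      split at hpre
      · -- match at front: output is new ++ …, w must be [] (its head would be in new)
        cases w with
        | nil => exact List.nil_prefix
        | cons a w' =>
          cases hn : new with
          | nil => exact absurd hn hnew
          | cons b new' =>
            rw [hn] at hpre
            have hab : a = b := (List.cons_prefix_cons.mp hpre).1
            have hbn : b ∈ new := by rw [hn]; exact List.mem_cons_self
            exact absurd List.mem_cons_self (hab ▸ hdis b hbn)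
      · cases w with
        | nil => exact List.nil_prefix
        | cons a w' =>
          obtain ⟨hac, hw'⟩ := List.cons_prefix_cons.mp hpre
          have hw't : w' <+: t := by
            refine ih w' t (fun x hx hmem => hdis x hx (List.mem_cons_of_mem _ hmem)) ?_ hw'
            simp only [List.length_cons] at hl; omega
          exact List.cons_prefix_cons.mpr ⟨hac, hw't⟩

-- L4: replace skips over a block u where old can match at no position
theorem replaceL_append_skip (old new : List Char) :
    ∀ (u t : List Char), (∀ p, p < u.length → ∀ t', ¬ old <+: (u.drop p ++ t')) →
      replaceL old new (u ++ t) = u ++ replaceL old new t := by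
  intro u
  induction u with
  | nil => intro t _; simp
  | cons c u' ih =>
    intro t H
    have h0 : ¬ old <+: (c :: u') ++ t := by
      have := H 0 (by simp) t
      simpa using this
    have hshape : (c :: u') ++ t = c :: (u' ++ t) := by simp
    rw [hshape, replaceL_cons_not_prefix new (by rw [← hshape]; exact h0)]
    rw [ih t (fun p hp t' => by
      have := H (p + 1) (by simp only [List.length_cons]; omega) t'
      simpa using this)]
    simp

theorem prefix_append_cases {old u t : List Char} (h : old <+: u ++ t) :
    old <+: u ∨ u <+: old :=
  List.prefix_or_prefix_of_prefix h (List.prefix_append u t)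

-- H-provider: old starts with '<' and no character of u is '<'
theorem no_match_inside (old u : List Char) (hoh : old.head? = some '<')
    (hu : ∀ a ∈ u, a ≠ '<') : ∀ p, p < u.length → ∀ t', ¬ old <+: (u.drop p ++ t') := by
  intro p hp t' hpre
  cases hd : u.drop p with
  | nil =>
    have : u.length - p = 0 := by rw [← List.length_drop, hd]; rfl
    omega
  | cons d ds =>
    rw [hd] at hpre
    cases old with
    | nil => simp at hoh
    | cons o os =>
      have ho : o = '<' := by simpa using hoh
      have hod : o = d := by
        have : (o :: os) <+: d :: (ds ++ t') := by simpa using hpre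
        exact (List.cons_prefix_cons.mp this).1
      have hdu : d ∈ u := List.drop_subset p u (hd ▸ List.mem_cons_self)
      exact hu d hdu (by rw [← hod, ho])

-- H-provider for keys: old and u are mutually non-prefix keys starting with '<'
theorem keys_no_match (old u : List Char) (hoh : old.head? = some '<')
    (hut : ∀ a ∈ u.tail, a ≠ '<') (h1 : ¬ old <+: u) (h2 : ¬ u <+: old) :
    ∀ p, p < u.length → ∀ t', ¬ old <+: (u.drop p ++ t') := by
  intro p hp t'
  cases p with
  | zero =>
    simp only [List.drop_zero]
    intro hpre
    rcases prefix_append_cases hpre with h | h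
    · exact h1 h
    · exact h2 h
  | succ q =>
    have hdt : u.drop (q + 1) = u.tail.drop q := by
      cases u <;> simp
    rw [hdt]
    refine no_match_inside old u.tail hoh hut q ?_ t'
    rcases u with _ | ⟨x, xs⟩
    · simp at hp
    · simp only [List.length_cons] at hp
      simpa using Nat.lt_of_succ_lt_succ hp

def foldRep (N : List (List Char × List Char)) (l : List Char) : List Char :=
  N.foldl (fun s kv => replaceL kv.1 kv.2 s) l

theorem foldRep_nil : ∀ N : List (List Char × List Char), foldRep N [] = [] := by
  intro N
  induction N with
  | nil => rfl
  | cons kv N' ih =>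
    show foldRep N' (replaceL kv.1 kv.2 []) = []
    rw [replaceL]
    exact ih

theorem foldRep_append_skip (u : List Char) :
    ∀ (N : List (List Char × List Char)) (t : List Char),
      (∀ kv ∈ N, ∀ p, p < u.length → ∀ t', ¬ kv.1 <+: (u.drop p ++ t')) →
      foldRep N (u ++ t) = u ++ foldRep N t := by
  intro N
  induction N with
  | nil => intro t _; rfl
  | cons kv N' ih =>
    intro t H
    show foldRep N' (replaceL kv.1 kv.2 (u ++ t)) = u ++ foldRep N' (replaceL kv.1 kv.2 t)
    rw [replaceL_append_skip kv.1 kv.2 u t (H kv List.mem_cons_self)]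
    exact ih _ (fun kv' h => H kv' (List.mem_cons_of_mem _ h))

-- facts about the literal table, each checked by kernel evaluation of a Bool scan
theorem mapB_head : ∀ kv ∈ pvMapB, kv.1.head? = some '<' := by
  have h : pvMapB.all (fun kv => kv.1.head? == some '<') = true := by rfl
  simp only [List.all_eq_true, beq_iff_eq] at h
  exact h

theorem mapB_tail_lt : ∀ kv ∈ pvMapB, ∀ a ∈ kv.1.tail, a ≠ '<' := by
  have h : pvMapB.all (fun kv => kv.1.tail.all (fun a => a != '<')) = true := by rfl
  simp only [List.all_eq_true, bne_iff_ne] at h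
  exact h

theorem mapB_val_ne : ∀ kv ∈ pvMapB, kv.2 ≠ [] := by
  have h : pvMapB.all (fun kv => !kv.2.isEmpty) = true := by rfl
  simp only [List.all_eq_true, Bool.not_eq_true', List.isEmpty_eq_false_iff] at h
  exact h

theorem mapB_val_lt : ∀ kv ∈ pvMapB, ∀ a ∈ kv.2, a ≠ '<' := by
  have h : pvMapB.all (fun kv => kv.2.all (fun a => a != '<')) = true := by rfl
  simp only [List.all_eq_true, bne_iff_ne] at h
  exact h

theorem mapB_disj : ∀ kv ∈ pvMapB, ∀ a ∈ kv.2, ∀ kv' ∈ pvMapB, a ∉ kv'.1 := by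
  have h : pvMapB.all
      (fun kv => kv.2.all (fun a => pvMapB.all (fun kv' => !(kv'.1.contains a)))) = true := by rfl
  simp only [List.all_eq_true, Bool.not_eq_true'] at h
  intro kv hkv a ha kv' hkv'
  have := h kv hkv a ha kv' hkv'
  simpa using this

-- distinct keys of the table are mutually non-prefix
theorem mapB_nonprefix : ∀ p ∈ pvMapB, ∀ q ∈ pvMapB, p.1 ≠ q.1 →
    ¬ p.1 <+: q.1 ∧ ¬ q.1 <+: p.1 := by
  have h : pvMapB.all (fun p => pvMapB.all (fun q =>
      (p.1 == q.1) || (!(p.1.isPrefixOf q.1) && !(q.1.isPrefixOf p.1)))) = true := by rfl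
  simp only [List.all_eq_true] at h
  intro p hp q hq hne
  have h2 := h p hp q hq
  rw [Bool.or_eq_true, Bool.and_eq_true] at h2
  rcases h2 with h2 | ⟨ha, hb⟩
  · exact absurd (beq_iff_eq.mp h2) hne
  · rw [Bool.not_eq_true'] at ha hb
    constructor
    · intro hpre
      rw [← List.isPrefixOf_iff_prefix, ha] at hpre
      exact Bool.false_ne_true hpre
    · intro hpre
      rw [← List.isPrefixOf_iff_prefix, hb] at hpre
      exact Bool.false_ne_true hpre

-- C2': when no key matches at the front, the whole fold passes the head character through
theorem foldRep_cons (c : Char) :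
    ∀ (N : List (List Char × List Char)) (t : List Char),
      (∀ kv ∈ N, kv ∈ pvMapB) → (∀ kv ∈ N, ¬ kv.1 <+: c :: t) →
      foldRep N (c :: t) = c :: foldRep N t := by
  intro N
  induction N with
  | nil => intro t _ _; rfl
  | cons kv N' ih =>
    intro t Hmem Hno
    have hkM : kv ∈ pvMapB := Hmem kv List.mem_cons_self
    have hnp : ¬ kv.1 <+: c :: t := Hno kv List.mem_cons_self
    show foldRep N' (replaceL kv.1 kv.2 (c :: t)) = c :: foldRep N' (replaceL kv.1 kv.2 t)
    rw [replaceL_cons_not_prefix kv.2 hnp]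
    refine ih (replaceL kv.1 kv.2 t) (fun kv' h => Hmem kv' (List.mem_cons_of_mem _ h)) ?_
    intro kv' hm hpre
    have hk'M : kv' ∈ pvMapB := Hmem kv' (List.mem_cons_of_mem _ hm)
    cases hk1 : kv'.1 with
    | nil => have := mapB_head kv' hk'M; rw [hk1] at this; simp at this
    | cons a k₀ =>
      have ha : a = '<' := by have := mapB_head kv' hk'M; rw [hk1] at this; simpa using this
      rw [hk1] at hpre
      obtain ⟨hac, hk₀⟩ := List.cons_prefix_cons.mp hpre
      have hk₀t : k₀ <+: t := by
        refine replaceL_no_new_prefix kv.1 kv.2 (mapB_val_ne kv hkM) t.length k₀ t ?_ le_rfl hk₀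
        intro x hx hmem
        exact mapB_disj kv hkM x hx kv' hk'M (by rw [hk1]; exact List.mem_cons_of_mem _ hmem)
      exact Hno kv' (List.mem_cons_of_mem _ hm) (by rw [hk1]; exact List.cons_prefix_cons.mpr ⟨hac, hk₀t⟩)

theorem main_eq : ∀ (n : Nat) (l : List Char), l.length ≤ n → foldRep pvMapB l = scanGo l := by
  intro n
  induction n with
  | zero =>
    intro l hl
    have hnil : l = [] := List.eq_nil_of_length_eq_zero (Nat.le_zero.mp hl)
    subst hnil
    rw [foldRep_nil, scanGo]
  | succ n ih =>
    intro l hl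
    cases l with
    | nil => rw [foldRep_nil, scanGo]
    | cons c t =>
      have ht : t.length ≤ n := by simp only [List.length_cons] at hl; omega
      cases hfind : pvMapB.find? (fun kv => kv.1.isPrefixOf (c :: t)) with
      | none =>
        have Hno : ∀ kv ∈ pvMapB, ¬ kv.1 <+: c :: t := by
          intro kv hm hp
          have := List.find?_eq_none.mp hfind kv hm
          simp only [List.isPrefixOf_iff_prefix] at this
          exact this hp
        rw [foldRep_cons c pvMapB t (fun _ h => h) Hno, ih t ht]
        rw [scanGo]
        by_cases hc : c = '<'
        · subst hc
          rw [if_pos rfl]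
          split
          · next kv h => rw [hfind] at h; simp at h
          · rfl
        · rw [if_neg hc]
      | some kv =>
        have hm : kv ∈ pvMapB := List.mem_of_find?_eq_some hfind
        rcases List.find?_eq_some_iff_append.mp hfind with ⟨hpkv, M₁, M₂, hsplit, hM₁⟩
        have hp : kv.1 <+: c :: t := List.isPrefixOf_iff_prefix.mp (by simpa using hpkv)
        have hp2 := hp
        obtain ⟨r, hr⟩ := hp2
        have hklen : 0 < kv.1.length := pvMapB_key_len kv hm
        have hmem₁ : ∀ kv' ∈ M₁, kv' ∈ pvMapB := by
          intro kv' h; rw [hsplit]; exact List.mem_append_left _ h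
        have hmem₂ : ∀ kv' ∈ M₂, kv' ∈ pvMapB := by
          intro kv' h; rw [hsplit]; exact List.mem_append_right _ (List.mem_cons_of_mem _ h)
        have hcross : ∀ kv' ∈ M₁, ¬ kv'.1 <+: kv.1 ∧ ¬ kv.1 <+: kv'.1 := by
          intro kv' h
          refine mapB_nonprefix kv' (hmem₁ kv' h) kv hm ?_
          intro he
          have hf := hM₁ kv' h
          rw [Bool.not_eq_true'] at hf
          have : kv'.1 <+: c :: t := he ▸ hp
          rw [← List.isPrefixOf_iff_prefix] at this
          simp only [hf] at this
          exact Bool.false_ne_true this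
        have H₁ : ∀ kv' ∈ M₁, ∀ p, p < kv.1.length → ∀ t', ¬ kv'.1 <+: (kv.1.drop p ++ t') := by
          intro kv' h
          exact keys_no_match kv'.1 kv.1 (mapB_head kv' (hmem₁ kv' h)) (mapB_tail_lt kv hm)
            (hcross kv' h).1 (hcross kv' h).2
        have H₂ : ∀ kv' ∈ M₂, ∀ p, p < kv.2.length → ∀ t', ¬ kv'.1 <+: (kv.2.drop p ++ t') := by
          intro kv' h
          exact no_match_inside kv'.1 kv.2 (mapB_head kv' (hmem₂ kv' h)) (mapB_val_lt kv hm)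
        have hrlen : r.length ≤ n := by
          have : kv.1.length + r.length = t.length + 1 := by
            rw [← List.length_append, hr]; simp
          omega
        have hc : c = '<' := by
          cases hk : kv.1 with
          | nil => rw [hk] at hklen; simp at hklen
          | cons a k₀ =>
            have ha : a = '<' := by have := mapB_head kv hm; rw [hk] at this; simpa using this
            rw [hk] at hr
            have : a = c := by
              have := congrArg (List.head? ·) hr
              simpa using this
            rw [← this, ha]
        have lhs_eq : foldRep pvMapB (c :: t) = kv.2 ++ foldRep pvMapB r := by
          conv_lhs => rw [hsplit, ← hr]
          have e1 : foldRep (M₁ ++ kv :: M₂) (kv.1 ++ r)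
              = foldRep M₂ (replaceL kv.1 kv.2 (foldRep M₁ (kv.1 ++ r))) := by
            simp [foldRep, List.foldl_append]
          rw [e1]
          rw [foldRep_append_skip kv.1 M₁ r H₁]
          rw [replaceL_append_self kv.1 kv.2 _ (List.ne_nil_of_length_pos hklen)]
          rw [foldRep_append_skip kv.2 M₂ _ H₂]
          congr 1
          rw [hsplit]
          simp [foldRep, List.foldl_append]
        rw [lhs_eq, ih r hrlen]
        rw [scanGo, if_pos hc]
        split
        · next kv' h =>
            rw [hfind] at h
            injection h with h
            subst h
            congr 1
            congr 1
            rw [← hr, List.drop_left]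
        · next h => rw [hfind] at h; simp at h

theorem str_rep (s o v : String) (ho : o.toList ≠ []) :
    PySem.Str.replace s o v = String.ofList (replaceL o.toList v.toList s.toList) := by
  rw [PySem.Str.replace, replace_eq _ _ _ ho]

theorem portA_eq (s : String) : parse_time_string s = String.ofList (foldRep pvMapB s.toList) := by
  simp only [parse_time_string, pvMapA, List.foldl_cons, List.foldl_nil]
  rw [str_rep _ _ _ (by decide)]
  rw [str_rep _ _ _ (by decide)]
  rw [str_rep _ _ _ (by decide)]
  rw [str_rep _ _ _ (by decide)]
  rw [str_rep _ _ _ (by decide)]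
  rw [str_rep _ _ _ (by decide)]
  rw [str_rep _ _ _ (by decide)]
  rw [str_rep _ _ _ (by decide)]
  rw [str_rep _ _ _ (by decide)]
  rw [str_rep _ _ _ (by decide)]
  rw [str_rep _ _ _ (by decide)]
  simp only [String.toList_ofList]
  simp only [foldRep]
  rfl

-- ===== VERDICT (by name: the statement is the Claim_ definition above) =====
theorem parse_time_string_spec : Claim_equal_parse_time_string := by
  intro s _
  unfold Spec_parse_time_string parse_time_string_alt
  rw [portA_eq]
  rw [main_eq s.toList.length s.toList le_rfl]
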